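-- pv_equiv track=rewrite | github.com/ffrfffff/raster-visualization-plugin | src/utils/pb_instruction.py | _parse_byte_mask
-- ===== SOURCE A (Python) =====
-- from typing import List, Optional, Sequence, Tuple
--
-- def _parse_byte_mask(byte_mask_bits: int, mask_words: Sequence[int], primitive_count: int) -> Tuple[int, ...]:
--     groups = []
--     for group in range((primitive_count + 7) // 8):
--         if byte_mask_bits & (1 << group):
--             groups.append(group)
--     indices = []
--     for packed_index, group in enumerate(groups):
--         word = mask_words[packed_index // 4]
--         byte_mask = (word >> ((packed_index % 4) * 8)) & 0xff
--         for bit in range(8):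
--             primitive = group * 8 + bit
--             if primitive < primitive_count and byte_mask & (1 << bit):
--                 indices.append(primitive)
--     return tuple(indices)
-- ===== SOURCE B (Python) =====
-- def _parse_byte_mask(byte_mask_bits, mask_words, primitive_count):
--     # Single fused pass over the groups with a running packed-index counter
--     # (no intermediate `groups` list), and per-byte decoding by lowest-set-bit
--     # extraction on the byte pre-masked to the remaining primitive range.
--     indices = []
--     packed_index = 0
--     for group in range((primitive_count + 7) // 8):
--         if not (byte_mask_bits & (1 << group)):
--             continue
--         byte = (mask_words[packed_index // 4] >> ((packed_index % 4) * 8)) & 0xFF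
--         packed_index += 1
--         base = group * 8
--         rem = primitive_count - base
--         if rem < 8:
--             byte &= (1 << rem) - 1
--         while byte:
--             low = byte & -byte
--             indices.append(base + low.bit_length() - 1)
--             byte &= byte - 1
--     return tuple(indices)
-- ===== Notes on version B (the rewrite author's own statement) =====
-- stated objective: alternative
-- what changed: The two sequential passes (collect set groups into a list, then enumerate it) are fused into one loop with a running packed-index counter, and the inner range(8) filter is replaced by lowest-set-bit extraction on the byte pre-masked to the remaining primitive range.
import Mathlib
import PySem

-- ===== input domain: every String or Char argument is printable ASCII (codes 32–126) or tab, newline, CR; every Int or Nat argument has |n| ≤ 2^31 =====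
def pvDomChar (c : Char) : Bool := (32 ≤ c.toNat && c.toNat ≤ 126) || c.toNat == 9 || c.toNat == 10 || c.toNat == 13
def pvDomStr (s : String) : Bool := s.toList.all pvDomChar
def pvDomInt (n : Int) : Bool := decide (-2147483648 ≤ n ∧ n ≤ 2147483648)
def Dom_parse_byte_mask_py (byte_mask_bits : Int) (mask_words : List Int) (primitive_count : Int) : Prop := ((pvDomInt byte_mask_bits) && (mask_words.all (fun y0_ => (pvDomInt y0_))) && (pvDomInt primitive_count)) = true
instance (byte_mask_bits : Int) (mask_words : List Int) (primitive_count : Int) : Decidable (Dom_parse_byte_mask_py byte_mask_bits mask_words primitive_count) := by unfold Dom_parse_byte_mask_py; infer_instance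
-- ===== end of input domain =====

-- ===== PORT A =====
-- B fuses A's two passes into one loop with a packed-index counter and decodes each
-- byte by lowest-set-bit extraction; return values proved equal on Pre_ (Python A
-- raises IndexError outside Pre_).
def parse_byte_mask_py (byte_mask_bits : Int) (mask_words : List Int) (primitive_count : Int) : List Int :=
  let groups : List Int :=
    (PySem.List.pyRange 0 (PySem.Int.floordiv (primitive_count + 7) 8) 1).foldl
      (fun acc group =>
        -- `if byte_mask_bits & (1 << group):` — group ≥ 0, so `.toNat` is exact
        if PySem.Int.band byte_mask_bits ((1 : Int) <<< group.toNat) ≠ 0 then acc ++ [group] else acc) []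
  (PySem.List.enumerate groups 0).foldl
    (fun acc pg =>
      -- mask_words[packed_index // 4] — in range under Pre_ (IndexError outside Pre_)
      let word := PySem.List.pyGetD mask_words (PySem.Int.floordiv pg.1 4) 0
      -- shift amount (packed_index % 4) * 8 is ≥ 0, so `.toNat` is exact
      let byteMask := PySem.Int.band (word >>> ((PySem.Int.mod pg.1 4) * 8).toNat) 255
      (PySem.List.pyRange 0 8 1).foldl
        (fun acc2 bit =>
          if pg.2 * 8 + bit < primitive_count ∧ PySem.Int.band byteMask ((1 : Int) <<< bit.toNat) ≠ 0
          then acc2 ++ [pg.2 * 8 + bit] else acc2) acc) []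

-- ===== PORT B =====
-- `while byte: low = byte & -byte; indices.append(base + low.bit_length() - 1); byte &= byte - 1`
-- byte is a Python int that is ≥ 0 at this point, carried as a Nat; `byte & -byte` is
-- computed with the Python-exact signed Int band, exactly as Source B computes it.
-- `fuel` only makes the loop structural: it starts at the byte value, which strictly
-- decreases (b &&& (b-1) < b for b ≠ 0), so the fuel branch is never the exit taken.
def decodeBitsGo (base : Int) : Nat → Nat → List Int → List Int
  | 0, _, acc => acc
  | fuel + 1, b, acc =>
    if b = 0 then acc
    else decodeBitsGo base fuel (b &&& (b - 1))
      (acc ++ [base + (PySem.Int.bitLength (PySem.Int.band (b : Int) (-(b : Int))) : Int) - 1])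

def decodeBits (base : Int) (b : Nat) (acc : List Int) : List Int := decodeBitsGo base b b acc

def parse_byte_mask_py_alt (byte_mask_bits : Int) (mask_words : List Int) (primitive_count : Int) : List Int :=
  ((PySem.List.pyRange 0 (PySem.Int.floordiv (primitive_count + 7) 8) 1).foldl
    (fun st group =>
      if PySem.Int.band byte_mask_bits ((1 : Int) <<< group.toNat) = 0 then st
      else
        -- st.2 is the running packed_index (≥ 0); byte0 = (words[pi//4] >> ((pi%4)*8)) & 0xFF
        let byte0 := PySem.Int.band
          ((PySem.List.pyGetD mask_words (PySem.Int.floordiv st.2 4) 0) >>>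
            ((PySem.Int.mod st.2 4) * 8).toNat) 255
        let base := group * 8
        let rem := primitive_count - base
        -- `if rem < 8: byte &= (1 << rem) - 1` — rem ≥ 1 here, so `.toNat` is exact
        let byte := if rem < 8 then PySem.Int.band byte0 (((1 : Int) <<< rem.toNat) - 1) else byte0
        -- byte ≥ 0, so `.toNat` is exact
        (decodeBits base byte.toNat st.1, st.2 + 1))
    ([], 0)).1

-- ===== PRECONDITION & SPEC =====
-- Pre_ excludes exactly the inputs on which Python A raises IndexError: when the number
-- of set low mask bits (= number of packed bytes to read) exceeds the 4*len(mask_words)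
-- bytes available; A returns normally iff this bound holds. The count is taken in
-- closed form: group bits ≥ 32 are all set iff byte_mask_bits < 0 (Dom bounds
-- |byte_mask_bits| ≤ 2^31), so only the low 32 bits need counting.
-- popcount of the low n bits of b (n ≤ 32 where it is used, so evaluation is O(1))
def pvPopLow (b : Int) : Nat → Nat
  | 0 => 0
  | n + 1 => (PySem.Int.mod b 2).toNat + pvPopLow (b >>> (1 : Nat)) n

def Pre_parse_byte_mask_py (byte_mask_bits : Int) (mask_words : List Int) (primitive_count : Int) : Prop :=
  pvPopLow byte_mask_bits (min ((PySem.Int.floordiv (primitive_count + 7) 8).toNat) 32)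
    + (if byte_mask_bits < 0 then ((PySem.Int.floordiv (primitive_count + 7) 8).toNat) - 32 else 0)
  ≤ 4 * mask_words.length
instance (byte_mask_bits : Int) (mask_words : List Int) (primitive_count : Int) : Decidable (Pre_parse_byte_mask_py byte_mask_bits mask_words primitive_count) := by unfold Pre_parse_byte_mask_py; infer_instance
def pvWitness_parse_byte_mask_py : Int × List Int × Int := (3, [257], 16)

def Spec_parse_byte_mask_py (byte_mask_bits : Int) (mask_words : List Int) (primitive_count : Int) (out : List Int) : Prop := out = parse_byte_mask_py_alt byte_mask_bits mask_words primitive_count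
instance (byte_mask_bits : Int) (mask_words : List Int) (primitive_count : Int) (out : List Int) : Decidable (Spec_parse_byte_mask_py byte_mask_bits mask_words primitive_count out) := by unfold Spec_parse_byte_mask_py; infer_instance

-- ===== CLAIM (what is proved, stated in full; the proofs are below) =====
def Claim_equal_parse_byte_mask_py : Prop := ∀ (byte_mask_bits : Int) (mask_words : List Int) (primitive_count : Int), Dom_parse_byte_mask_py byte_mask_bits mask_words primitive_count → Pre_parse_byte_mask_py byte_mask_bits mask_words primitive_count → Spec_parse_byte_mask_py byte_mask_bits mask_words primitive_count (parse_byte_mask_py byte_mask_bits mask_words primitive_count)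

-- ===== LEMMAS AND PROOFS =====

-- proof-side (let-free) names for the two loop bodies, pointwise equal to the port lambdas
def stepA (primitive_count : Int) (mask_words : List Int) (acc : List Int) (pg : Int × Int) : List Int :=
  (PySem.List.pyRange 0 8 1).foldl
    (fun acc2 bit =>
      if pg.2 * 8 + bit < primitive_count ∧
          PySem.Int.band
            (PySem.Int.band ((PySem.List.pyGetD mask_words (PySem.Int.floordiv pg.1 4) 0) >>>
              ((PySem.Int.mod pg.1 4) * 8).toNat) 255) ((1 : Int) <<< bit.toNat) ≠ 0
      then acc2 ++ [pg.2 * 8 + bit] else acc2) acc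

def stepB (byte_mask_bits : Int) (mask_words : List Int) (primitive_count : Int)
    (st : List Int × Int) (group : Int) : List Int × Int :=
  if PySem.Int.band byte_mask_bits ((1 : Int) <<< (↑group.toNat : Int)) = 0 then st
  else
    (decodeBits (group * 8)
      ((if primitive_count - group * 8 < 8
        then PySem.Int.band
          (PySem.Int.band ((PySem.List.pyGetD mask_words (PySem.Int.floordiv st.2 4) 0) >>>
            ((PySem.Int.mod st.2 4) * 8).toNat) 255)
          (((1 : Int) <<< (primitive_count - group * 8).toNat) - 1)
        else PySem.Int.band ((PySem.List.pyGetD mask_words (PySem.Int.floordiv st.2 4) 0) >>>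
            ((PySem.Int.mod st.2 4) * 8).toNat) 255).toNat) st.1,
     st.2 + 1)

lemma portA_eq (byte_mask_bits : Int) (mask_words : List Int) (primitive_count : Int) :
    parse_byte_mask_py byte_mask_bits mask_words primitive_count =
      (PySem.List.enumerate
        ((PySem.List.pyRange 0 (PySem.Int.floordiv (primitive_count + 7) 8) 1).foldl
          (fun acc group =>
            if PySem.Int.band byte_mask_bits ((1 : Int) <<< group.toNat) ≠ 0 then acc ++ [group] else acc) []) 0).foldl
        (stepA primitive_count mask_words) [] := rfl

-- the per-bit emission order of decodeBits, as a list independent of base/acc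
def decodeListGo : Nat → Nat → List Int
  | 0, _ => []
  | fuel + 1, b =>
    if b = 0 then []
    else ((PySem.Int.bitLength (PySem.Int.band (b : Int) (-(b : Int))) : Int) - 1) ::
      decodeListGo fuel (b &&& (b - 1))

def decodeList (b : Nat) : List Int := decodeListGo b b

lemma decodeBitsGo_eq (base : Int) : ∀ (fuel b : Nat), b ≤ fuel → ∀ (acc : List Int),
    decodeBitsGo base fuel b acc = acc ++ (decodeListGo fuel b).map (fun k => base + k) := by
  intro fuel
  induction fuel with
  | zero => intro b hb acc; interval_cases b; simp [decodeBitsGo, decodeListGo]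
  | succ fuel ih =>
    intro b hb acc
    by_cases h : b = 0
    · simp [decodeBitsGo, decodeListGo, h]
    · rw [show decodeBitsGo base (fuel + 1) b acc = decodeBitsGo base fuel (b &&& (b - 1))
            (acc ++ [base + (PySem.Int.bitLength (PySem.Int.band (b : Int) (-(b : Int))) : Int) - 1])
          from by simp [decodeBitsGo, h]]
      rw [ih (b &&& (b - 1)) (Nat.le_trans Nat.and_le_right (by omega)) _]
      simp [decodeListGo, h, add_sub_assoc]

lemma decodeBits_eq (base : Int) (b : Nat) (acc : List Int) :
    decodeBits base b acc = acc ++ (decodeList b).map (fun k => base + k) :=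
  decodeBitsGo_eq base b b le_rfl acc

-- finite cores, checked by evaluation over all byte values
set_option maxRecDepth 40000 in
lemma decode_core : ∀ rr : Nat, rr < 9 → ∀ b : Nat, b < 256 →
    decodeList (b &&& (2 ^ rr - 1)) =
      ((List.range 8).filter (fun k => decide (k < rr) && b.testBit k)).map (Nat.cast : Nat → Int) := by
  decide

set_option maxRecDepth 40000 in
lemma bit_core : ∀ b : Nat, b < 256 → ∀ k : Nat, k < 8 →
    ((PySem.Int.band (b : Int) ((1 : Int) <<< k) ≠ 0) ↔ b.testBit k = true) := by
  decide

set_option maxRecDepth 40000 in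
lemma mask_core : ∀ rr : Nat, rr < 8 → ∀ b : Nat, b < 256 →
    (PySem.Int.band (b : Int) (((1 : Int) <<< rr) - 1)).toNat = b &&& (2 ^ rr - 1) := by
  decide

set_option maxRecDepth 40000 in
lemma full_core : ∀ b : Nat, b < 256 → b &&& (2 ^ 8 - 1) = b := by decide

lemma band255_bounds (w : Int) : 0 ≤ PySem.Int.band w 255 ∧ PySem.Int.band w 255 < 256 := by
  unfold PySem.Int.band
  split_ifs
  all_goals try omega
  · have hh : w.toNat &&& (255 : Int).toNat ≤ (255 : Int).toNat := Nat.and_le_right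
    omega

-- Prop-conditioned append-fold with a mapped element (PySem.List.foldl_append_if is
-- Bool-conditioned, foldl_append_ite_eq_filter has no map; this combines the two shapes)
lemma foldl_append_ite_map {α β : Type} (p : α → Prop) [inst : DecidablePred p] (f : α → β)
    (l : List α) (acc : List β) :
    l.foldl (fun a x => if p x then a ++ [f x] else a) acc
      = acc ++ (l.filter (fun x => decide (p x))).map f := by
  induction l generalizing acc with
  | nil => simp
  | cons x l ih =>
    by_cases h : p x
    · rw [List.foldl_cons, if_pos h, ih,
        List.filter_cons_of_pos (by simp only [decide_eq_true_eq]; exact h)]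
      simp
    · rw [List.foldl_cons, if_neg h, ih, List.filter_cons_of_neg (by simpa using h)]

lemma inner (pc base : Int) (hr : base < pc) (b : Nat) (hb : b < 256) (acc : List Int) :
    (PySem.List.pyRange 0 8 1).foldl
      (fun acc2 bit =>
        if base + bit < pc ∧ PySem.Int.band (b : Int) ((1 : Int) <<< bit.toNat) ≠ 0
        then acc2 ++ [base + bit] else acc2) acc
    = decodeBits base
        ((if pc - base < 8 then PySem.Int.band (b : Int) (((1 : Int) <<< (pc - base).toNat) - 1)
          else (b : Int)).toNat) acc := by
  have hm : (if pc - base < 8 then PySem.Int.band (b : Int) (((1 : Int) <<< (pc - base).toNat) - 1)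
        else (b : Int)).toNat = b &&& (2 ^ (min (pc - base).toNat 8) - 1) := by
    split_ifs with h
    · have h7 : (pc - base).toNat < 8 := by omega
      have e : min (pc - base).toNat 8 = (pc - base).toNat := by omega
      rw [e]; exact mask_core _ h7 b hb
    · have e : min (pc - base).toNat 8 = 8 := by omega
      rw [e, full_core b hb, Int.toNat_natCast]
  rw [hm, decodeBits_eq, decode_core (min (pc - base).toNat 8) (by omega) b hb]
  rw [foldl_append_ite_map]
  have h8 : (List.range 8).map (Nat.cast : Nat → Int) = PySem.List.pyRange 0 8 1 := by decide
  rw [← h8, List.filter_map, List.map_map, List.map_map]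
  congr 1
  have hfc : ∀ k ∈ List.range 8,
      ((fun x => decide (base + x < pc ∧ PySem.Int.band (b : Int) ((1 : Int) <<< x.toNat) ≠ 0)) ∘
        (Nat.cast : Nat → Int)) k
      = (fun k => decide (k < min (pc - base).toNat 8) && b.testBit k) k := ?_
  · rw [List.filter_congr hfc]
  intro k hk
  have hk8 : k < 8 := List.mem_range.mp hk
  have e2 := bit_core b hb k hk8
  have e1 : (base + (k : Int) < pc) ↔ (k < min (pc - base).toNat 8) := by omega
  simp only [Function.comp_apply, Int.toNat_natCast]
  by_cases h2 : b.testBit k <;> by_cases h1 : k < min (pc - base).toNat 8 <;>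
    simp [h1, h2, e2, e1]

lemma fuseF (byte_mask_bits : Int) (mask_words : List Int) (primitive_count : Int)
    (F : List Int × Int → Int → List Int × Int)
    (hF : ∀ st g, F st g = stepB byte_mask_bits mask_words primitive_count st g)
    (l : List Int) (hl : ∀ g ∈ l, g * 8 < primitive_count) :
    ∀ (acc : List Int) (k : Int),
    (PySem.List.enumerate
      (l.filter (fun g => decide (PySem.Int.band byte_mask_bits ((1 : Int) <<< (↑g.toNat : Int)) ≠ 0))) k).foldl
      (stepA primitive_count mask_words) acc
    = (l.foldl F (acc, k)).1 := by
  induction l with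
  | nil => intro acc k; simp [PySem.List.enumerate_nil]
  | cons g l ih =>
    intro acc k
    have hg : g * 8 < primitive_count := hl g (by simp)
    have hl' : ∀ x ∈ l, x * 8 < primitive_count := fun x hx => hl x (by simp [hx])
    by_cases hp : PySem.Int.band byte_mask_bits ((1 : Int) <<< (↑g.toNat : Int)) = 0
    · rw [List.filter_cons_of_neg (by simp only [decide_eq_true_eq]; exact not_not_intro hp),
        List.foldl_cons, hF]
      rw [show stepB byte_mask_bits mask_words primitive_count (acc, k) g = (acc, k) from by
        unfold stepB; rw [if_pos hp]]
      exact ih hl' acc k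
    · rw [List.filter_cons_of_pos (by simp only [decide_eq_true_eq]; exact hp),
        PySem.List.enumerate_cons, List.foldl_cons, List.foldl_cons, hF]
      have hstep : stepB byte_mask_bits mask_words primitive_count (acc, k) g
          = (stepA primitive_count mask_words acc (k, g), k + 1) := by
        unfold stepB stepA
        rw [if_neg hp]
        dsimp only
        have hE := band255_bounds ((PySem.List.pyGetD mask_words (PySem.Int.floordiv k 4) 0) >>>
          ((PySem.Int.mod k 4) * 8).toNat)
        obtain ⟨bn, hbn⟩ : ∃ n : Nat, (n : Int) = PySem.Int.band
            ((PySem.List.pyGetD mask_words (PySem.Int.floordiv k 4) 0) >>>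
              ((PySem.Int.mod k 4) * 8).toNat) 255 :=
          ⟨_, Int.toNat_of_nonneg hE.1⟩
        have hbn2 : bn < 256 := by omega
        simp only [Prod.mk.injEq]
        refine ⟨?_, trivial⟩
        rw [← hbn]
        exact (inner primitive_count (g * 8) hg bn hbn2 acc).symm
      rw [hstep]
      exact ih hl' (stepA primitive_count mask_words acc (k, g)) (k + 1)

-- ===== VERDICT (by name: the statement is the Claim_ definition above) =====
theorem parse_byte_mask_py_spec : Claim_equal_parse_byte_mask_py := by
  intro byte_mask_bits mask_words primitive_count _ _
  unfold Spec_parse_byte_mask_py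
  rw [portA_eq]
  unfold parse_byte_mask_py_alt
  rw [PySem.List.foldl_append_ite_eq_filter, List.nil_append]
  have hl : ∀ g ∈ PySem.List.pyRange 0 (PySem.Int.floordiv (primitive_count + 7) 8) 1,
      g * 8 < primitive_count := by
    intro g hg
    rw [PySem.List.mem_pyRange_one] at hg
    have h2 : g + 1 ≤ PySem.Int.floordiv (primitive_count + 7) 8 := by omega
    rw [PySem.Int.le_floordiv_iff_mul_le (by norm_num)] at h2
    omega
  refine fuseF byte_mask_bits mask_words primitive_count _ ?_ _ hl [] 0
  intro st g
  rfl
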